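-- pv_equiv track=rewrite | github.com/rubelw/OSSS | src/OSSS/ai/agents/query_data/handlers/projects_handler.py | _select_fieldnames
-- ===== SOURCE A (Python) =====
-- from typing import Any, Dict, List, Sequence
--
-- def _select_fieldnames(rows: Sequence[Dict[str, Any]]) -> List[str]:
--     """
--     Derive a stable field order for projects.
--     """
--     if not rows:
--         return []
--
--     preferred_order = [
--         "id",
--         "external_id",
--         "name",
--         "title",
--         "project_type",
--         "status",
--         "owner",
--         "start_date",
--         "end_date",
--         "created_at",
--         "updated_at",
--     ]
--
--     all_keys: List[str] = []
--     for r in rows: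
--         for k in r.keys():
--             if k not in all_keys:
--                 all_keys.append(k)
--
--     ordered: List[str] = []
--     for col in preferred_order:
--         if col in all_keys:
--             ordered.append(col)
--
--     for col in all_keys:
--         if col not in ordered:
--             ordered.append(col)
--
--     return ordered
-- ===== SOURCE B (Python) =====
-- from typing import Any, Dict, List, Sequence
--
-- def _select_fieldnames(rows: Sequence[Dict[str, Any]]) -> List[str]:
--     """
--     Derive a stable field order for projects (bucket version).
--     """
--     preferred_order = [
--         "id",
--         "external_id",
--         "name",
--         "title",
--         "project_type",
--         "status",
--         "owner",
--         "start_date",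
--         "end_date",
--         "created_at",
--         "updated_at",
--     ]
--     rank = {c: i for i, c in enumerate(preferred_order)}
--     sentinel = len(preferred_order)
--     buckets: List[List[str]] = [[] for _ in range(sentinel + 1)]
--     for k in dict.fromkeys(k for r in rows for k in r):
--         buckets[rank.get(k, sentinel)].append(k)
--     return [k for b in buckets for k in b]
-- ===== Notes on version B (the rewrite author's own statement) =====
-- stated objective: faster
-- what changed: A's three membership-scanning passes (dedup by linear search over the growing key list, then a preferred-order scan, then a not-yet-emitted scan) are replaced by a single counting-sort-style pass: a rank dict maps each preferred column to its index, every key goes into the bucket of its rank (non-preferred keys share the sentinel bucket), and the buckets are concatenated.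
import Mathlib
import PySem

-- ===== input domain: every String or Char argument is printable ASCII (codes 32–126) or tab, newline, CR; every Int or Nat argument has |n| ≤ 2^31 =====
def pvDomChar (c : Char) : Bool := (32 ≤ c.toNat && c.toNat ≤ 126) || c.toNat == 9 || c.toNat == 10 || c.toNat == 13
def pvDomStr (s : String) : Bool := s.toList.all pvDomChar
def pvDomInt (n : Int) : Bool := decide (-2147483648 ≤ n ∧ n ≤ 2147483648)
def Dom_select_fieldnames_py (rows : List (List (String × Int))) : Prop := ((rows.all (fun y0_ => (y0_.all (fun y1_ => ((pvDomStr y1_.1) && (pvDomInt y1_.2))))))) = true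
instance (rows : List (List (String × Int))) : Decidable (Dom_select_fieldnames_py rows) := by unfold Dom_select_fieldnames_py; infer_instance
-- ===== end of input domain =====

-- B replaces A's three membership-scanning passes by one counting-sort-style pass: a rank
-- dict and 12 buckets, each key appended to its rank's bucket, buckets concatenated.

-- ===== PORT A =====
-- the preferred_order literal (shared data constant of both Pythons)
def pvPreferred : List String :=
  ["id", "external_id", "name", "title", "project_type", "status",
   "owner", "start_date", "end_date", "created_at", "updated_at"]

def select_fieldnames_py (rows : List (List (String × Int))) : List String :=
  if rows = [] then []
  else
    -- all_keys: first-seen accumulation of the rows' keys (r.keys() = first occurrences of r's key list)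
    let all_keys : List String := rows.foldl (fun all_keys r =>
      (PySem.List.dedup (r.map (·.1))).foldl (fun all_keys k =>
        if k ∈ all_keys then all_keys else all_keys ++ [k]) all_keys) []
    let ordered : List String := pvPreferred.foldl (fun ordered col =>
      if col ∈ all_keys then ordered ++ [col] else ordered) []
    let ordered := all_keys.foldl (fun ordered col =>
      if col ∈ ordered then ordered else ordered ++ [col]) ordered
    ordered

-- ===== PORT B =====
-- rank = {c: i for i, c in enumerate(preferred_order)}
def pvRank : PySem.Dict String Int :=
  (PySem.List.enumerate pvPreferred).foldl (fun d ic => d.insert ic.2 ic.1) PySem.Dict.empty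

def select_fieldnames_py_alt (rows : List (List (String × Int))) : List String :=
  let sentinel : Int := PySem.List.len pvPreferred
  let buckets : List (List String) :=
    (PySem.List.pyRange 0 (sentinel + 1) 1).map (fun _ => ([] : List String))
  let buckets := (PySem.List.dedup (rows.flatMap (fun r =>
      PySem.List.dedup (r.map (·.1))))).foldl (fun buckets k =>
    let i := pvRank.getD k sentinel
    PySem.List.pySetD buckets i (PySem.List.pyGetD buckets i [] ++ [k])) buckets
  buckets.flatMap (fun b => b)

-- ===== PRECONDITION & SPEC =====
def Spec_select_fieldnames_py (rows : List (List (String × Int))) (out : List String) : Prop := out = select_fieldnames_py_alt rows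
instance (rows : List (List (String × Int))) (out : List String) : Decidable (Spec_select_fieldnames_py rows out) := by unfold Spec_select_fieldnames_py; infer_instance

-- ===== CLAIM (what is proved, stated in full; the proofs are below) =====
def Claim_equal_select_fieldnames_py : Prop := ∀ (rows : List (List (String × Int))), Dom_select_fieldnames_py rows → Spec_select_fieldnames_py rows (select_fieldnames_py rows)

-- ===== LEMMAS AND PROOFS =====

-- the rank function pvRank.getD · 11 computes, written as a plain if-chain
def rankSpec (k : String) : Int :=
  if k = "id" then 0 else if k = "external_id" then 1 else if k = "name" then 2
  else if k = "title" then 3 else if k = "project_type" then 4 else if k = "status" then 5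
  else if k = "owner" then 6 else if k = "start_date" then 7 else if k = "end_date" then 8
  else if k = "created_at" then 9 else if k = "updated_at" then 10 else 11

theorem rank_eq_spec (k : String) : pvRank.getD k 11 = rankSpec k := by
  by_cases hk : k ∈ pvPreferred
  · simp only [pvPreferred, List.mem_cons, List.not_mem_nil, or_false] at hk
    rcases hk with rfl|rfl|rfl|rfl|rfl|rfl|rfl|rfl|rfl|rfl|rfl <;> decide
  · have hc : pvRank.contains k = false := by
      rw [PySem.Dict.contains_eq_decide_mem_keys]
      have hkeys : pvRank.keys = pvPreferred := by
        unfold pvRank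
        rw [PySem.Dict.keys_foldl_insert_key]
        decide
      rw [hkeys]; simpa using hk
    rw [PySem.Dict.getD_of_not_contains _ _ hc]
    simp only [pvPreferred, List.mem_cons, List.not_mem_nil, or_false, not_or] at hk
    unfold rankSpec
    simp [hk.1, hk.2.1, hk.2.2.1, hk.2.2.2.1, hk.2.2.2.2.1, hk.2.2.2.2.2.1, hk.2.2.2.2.2.2.1,
      hk.2.2.2.2.2.2.2.1, hk.2.2.2.2.2.2.2.2.1, hk.2.2.2.2.2.2.2.2.2.1, hk.2.2.2.2.2.2.2.2.2.2]

theorem rankSpec_nonneg (k : String) : 0 ≤ rankSpec k := by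
  unfold rankSpec; split_ifs <;> omega

theorem rankSpec_le (k : String) : rankSpec k ≤ 11 := by
  unfold rankSpec; split_ifs <;> omega

theorem rankSpec_eq_eleven_iff (k : String) : rankSpec k = 11 ↔ k ∉ pvPreferred := by
  unfold rankSpec pvPreferred
  split_ifs with h1 h2 h3 h4 h5 h6 h7 h8 h9 h10 h11 <;> simp_all

-- A's conditional-append is PySem.Set.add
theorem append_if_eq_add (acc : List String) (k : String) :
    (if k ∈ acc then acc else acc ++ [k]) = PySem.Set.add acc k := by
  rw [PySem.Set.add_eq_ite]

-- the nested all_keys loop builds Set.ofList of the flattened key lists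
theorem allkeys_eq_ofList (rows : List (List (String × Int))) :
    rows.foldl (fun all_keys r =>
      (PySem.List.dedup (r.map (·.1))).foldl (fun all_keys k =>
        if k ∈ all_keys then all_keys else all_keys ++ [k]) all_keys) [] =
    PySem.Set.ofList (rows.flatMap (fun r => PySem.List.dedup (r.map (·.1)))) := by
  rw [PySem.Set.ofList_eq_foldl]
  suffices h : ∀ (s : List String), rows.foldl (fun all_keys r =>
      (PySem.List.dedup (r.map (·.1))).foldl (fun all_keys k =>
        if k ∈ all_keys then all_keys else all_keys ++ [k]) all_keys) s =
      (rows.flatMap (fun r => PySem.List.dedup (r.map (·.1)))).foldl PySem.Set.add s from h []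
  intro s
  induction rows generalizing s with
  | nil => rfl
  | cons r rows ih =>
    simp only [List.foldl_cons, List.flatMap_cons, List.foldl_append, ih]
    have h2 : (PySem.List.dedup (r.map (·.1))).foldl
        (fun all_keys k => if k ∈ all_keys then all_keys else all_keys ++ [k]) s =
        (PySem.List.dedup (r.map (·.1))).foldl PySem.Set.add s :=
      PySem.List.foldl_congr_mem _ _ _ _ (fun acc x _ => append_if_eq_add acc x)
    rw [h2]

-- folding Set.add of a nodup list appends exactly the new elements, in order
theorem update_eq_append_filter (K : List String) (hK : K.Nodup) :
    ∀ s : List String, K.foldl PySem.Set.add s = s ++ K.filter (fun x => decide (x ∉ s)) := by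
  induction K with
  | nil => intro s; simp
  | cons k K ih =>
    intro s
    have hnd := hK
    simp only [List.nodup_cons] at hnd
    rw [List.foldl_cons, ih hnd.2, PySem.Set.add_eq_ite]
    by_cases hks : k ∈ s
    · simp only [hks, if_pos, List.filter_cons]
      simp
    · simp [hks]
      exact List.filter_congr (fun x hx => by
        have hxk : x ≠ k := fun h => hnd.1 (h ▸ hx); simp [hxk])

-- filtering a nodup list for one value
theorem filter_eq_singleton (K : List String) (hK : K.Nodup) (c : String) :
    K.filter (fun x => decide (x = c)) = if c ∈ K then [c] else [] := by
  induction K with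
  | nil => simp
  | cons k K ih =>
    simp only [List.nodup_cons] at hK
    rw [List.filter_cons]
    by_cases hkc : k = c
    · subst hkc
      have hnone : K.filter (fun x => decide (x = k)) = [] := by
        rw [List.filter_eq_nil_iff]
        intro a ha
        simp only [decide_eq_true_eq]
        exact fun h => hK.1 (h ▸ ha)
      simp [hnone]
    · simp only [hkc, decide_false]
      rw [ih hK.2]
      simp [List.mem_cons, Ne.symm hkc]

def bucketsOf (L : List String) : List (List String) :=
  (List.range 12).map (fun i => L.filter (fun k => decide ((rankSpec k).toNat = i)))

theorem length_bucketsOf (L : List String) : (bucketsOf L).length = 12 := by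
  simp [bucketsOf]

-- the bucket loop, characterised: bucket i holds the processed keys of rank i, in order
theorem buckets_fold (L : List String) :
    L.foldl (fun buckets k =>
        PySem.List.pySetD buckets (rankSpec k) (PySem.List.pyGetD buckets (rankSpec k) [] ++ [k]))
      ((PySem.List.pyRange 0 12 1).map (fun _ => ([] : List String))) =
    bucketsOf L := by
  have h0 : (PySem.List.pyRange 0 12 1).map (fun _ => ([] : List String)) = bucketsOf [] := by decide
  rw [h0]
  induction L using List.reverseRecOn with
  | nil => rfl
  | append_singleton L k ih =>
    rw [List.foldl_append, ih, List.foldl_cons, List.foldl_nil]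
    have hnn := rankSpec_nonneg k
    have hle := rankSpec_le k
    have hlen : ((bucketsOf L).length : Int) = 12 := by rw [length_bucketsOf]; rfl
    rw [PySem.List.pySetD_of_nonneg _ _ hnn,
        PySem.List.pyGetD_eq_getElem _ _ hnn (by rw [hlen]; omega)]
    apply List.ext_getElem
    · simp [length_bucketsOf]
    · intro j hj hj'
      have hj12 : j < 12 := by simpa [length_bucketsOf] using hj'
      have hget : ∀ (M : List String) (m : Nat) (hm : m < 12),
          (bucketsOf M)[m]'(by rw [length_bucketsOf]; exact hm) =
          M.filter (fun k => decide ((rankSpec k).toNat = m)) := by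
        intro M m hm
        unfold bucketsOf
        rw [List.getElem_map, List.getElem_range]
      rw [List.getElem_set, hget (L ++ [k]) j hj12, List.filter_append, hget L j hj12]
      by_cases hji : (rankSpec k).toNat = j
      · rw [if_pos hji, hget L _ (by omega)]
        simp [hji]
      · rw [if_neg hji]
        simp [hji]

-- the rank if-chain is idxOf into the preferred list (length 11 when absent)
theorem rank_toNat (k : String) : (rankSpec k).toNat = pvPreferred.idxOf k := by
  by_cases hk : k ∈ pvPreferred
  · simp only [pvPreferred, List.mem_cons, List.not_mem_nil, or_false] at hk
    rcases hk with rfl|rfl|rfl|rfl|rfl|rfl|rfl|rfl|rfl|rfl|rfl <;> decide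
  · have h1 : rankSpec k = 11 := (rankSpec_eq_eleven_iff k).mpr hk
    rw [h1, List.idxOf_eq_length hk]
    rfl

-- concatenating position-buckets of a nodup key list recovers P-order then first-seen order
theorem buckets_concat (P : List String) (hP : P.Nodup) :
    ∀ K : List String, K.Nodup →
    (List.range (P.length + 1)).flatMap (fun i => K.filter (fun k => decide (P.idxOf k = i))) =
    P.filter (fun c => decide (c ∈ K)) ++ K.filter (fun k => decide (k ∉ P)) := by
  induction P with
  | nil =>
    intro K hK
    simp [List.idxOf]
  | cons p P ih =>
    intro K hK
    simp only [List.nodup_cons] at hP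
    rw [List.range_succ_eq_map]
    rw [List.flatMap_cons, List.flatMap_map]
    have hhead : K.filter (fun k => decide ((p :: P).idxOf k = 0)) =
        K.filter (fun x => decide (x = p)) := by
      apply List.filter_congr
      intro k _
      by_cases hkp : k = p
      · subst hkp; simp
      · simp [hkp, Ne.symm hkp]
    have htail : ∀ i : Nat, (fun k => decide ((p :: P).idxOf k = i + 1)) =
        (fun k => decide (k ≠ p) && decide (P.idxOf k = i)) := by
      intro i
      funext k
      by_cases hkp : k = p
      · subst hkp; simp
      · simp [hkp, Ne.symm hkp]
    have hK' : (K.filter (fun k => decide (k ≠ p))).Nodup := hK.filter _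
    have hbody : (List.range (P.length + 1)).flatMap
          (fun i => K.filter (fun k => decide ((p :: P).idxOf k = i + 1))) =
        (List.range (P.length + 1)).flatMap
          (fun i => (K.filter (fun k => decide (k ≠ p))).filter (fun k => decide (P.idxOf k = i))) := by
      apply List.flatMap_congr
      intro i _
      rw [htail i, ← List.filter_filter]
      exact List.filter_comm _ _ _
    simp only [List.length_cons, Nat.succ_eq_add_one]
    rw [hhead, filter_eq_singleton K hK p, hbody, ih hP.2 _ hK']
    have hPfil : P.filter (fun c => decide (c ∈ K.filter (fun k => decide (k ≠ p)))) =
        P.filter (fun c => decide (c ∈ K)) := by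
      apply List.filter_congr
      intro c hc
      have hcp : c ≠ p := fun h => hP.1 (h ▸ hc)
      simp [List.mem_filter, hcp]
    have hrest : (K.filter (fun k => decide (k ≠ p))).filter (fun k => decide (k ∉ P)) =
        K.filter (fun k => decide (k ∉ p :: P)) := by
      rw [List.filter_filter]
      apply List.filter_congr
      intro k _
      by_cases h1 : k = p <;> by_cases h2 : k ∈ P <;> simp [h1, h2]
    rw [hPfil, hrest, List.filter_cons]
    by_cases hp : p ∈ K <;> simp [hp]

-- concatenated buckets = preferred-that-occur ++ the rest in first-seen order
theorem flat_buckets (K : List String) (hK : K.Nodup) :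
    (bucketsOf K).flatMap (fun b => b) =
    pvPreferred.filter (fun c => decide (c ∈ K)) ++ K.filter (fun x => decide (x ∉ pvPreferred)) := by
  unfold bucketsOf
  rw [List.flatMap_map]
  have h12 : (12 : Nat) = pvPreferred.length + 1 := rfl
  rw [h12]
  have hcong : ∀ i ∈ List.range (pvPreferred.length + 1),
      K.filter (fun k => decide ((rankSpec k).toNat = i)) =
      K.filter (fun k => decide (pvPreferred.idxOf k = i)) := by
    intro i _
    apply List.filter_congr
    intro k _
    rw [rank_toNat]
  rw [List.flatMap_congr hcong]
  exact buckets_concat pvPreferred (by decide) K hK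

-- ===== VERDICT (by name: the statement is the Claim_ definition above) =====
theorem select_fieldnames_py_spec : Claim_equal_select_fieldnames_py := by
  intro rows _
  unfold Spec_select_fieldnames_py
  by_cases hrows : rows = []
  · subst hrows; decide
  · unfold select_fieldnames_py select_fieldnames_py_alt
    rw [if_neg hrows]
    have hsent : PySem.List.len pvPreferred = (11 : Int) := by decide
    simp only [hsent]
    set K := PySem.Set.ofList (rows.flatMap (fun r => PySem.List.dedup (r.map (·.1)))) with hKdef
    have hKnd : K.Nodup := PySem.Set.nodup_ofList _
    -- A side
    rw [allkeys_eq_ofList, ← hKdef]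
    rw [PySem.List.foldl_append_ite_eq_filter (fun col => col ∈ K) pvPreferred []]
    have hA2 : K.foldl (fun ordered col => if col ∈ ordered then ordered else ordered ++ [col])
        ([] ++ pvPreferred.filter (fun x => decide (x ∈ K))) =
        K.foldl PySem.Set.add ([] ++ pvPreferred.filter (fun x => decide (x ∈ K))) :=
      PySem.List.foldl_congr_mem _ _ _ _ (fun acc x _ => append_if_eq_add acc x)
    rw [hA2, update_eq_append_filter K hKnd]
    -- B side
    rw [PySem.List.dedup_eq_ofList, ← hKdef]
    have hB1 : K.foldl (fun buckets k =>
        PySem.List.pySetD buckets (pvRank.getD k 11) (PySem.List.pyGetD buckets (pvRank.getD k 11) [] ++ [k]))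
        ((PySem.List.pyRange 0 (11 + 1) 1).map (fun _ => ([] : List String))) = bucketsOf K := by
      rw [PySem.List.foldl_congr_mem _ _
        (fun buckets k => PySem.List.pySetD buckets (rankSpec k) (PySem.List.pyGetD buckets (rankSpec k) [] ++ [k]))
        _ (fun acc x _ => by rw [rank_eq_spec])]
      exact buckets_fold K
    rw [hB1, flat_buckets K hKnd]
    -- both sides are now the same concatenation
    have hpref : pvPreferred.filter (fun x => decide (x ∈ K)) =
        pvPreferred.filter (fun c => decide (c ∈ K)) := rfl
    have hrest : K.filter (fun x => decide (x ∉ ([] ++ pvPreferred.filter (fun x => decide (x ∈ K))))) =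
        K.filter (fun x => decide (x ∉ pvPreferred)) := by
      apply List.filter_congr
      intro x hx
      simp only [List.nil_append, List.mem_filter, decide_eq_true_eq]
      by_cases hm : x ∈ pvPreferred <;> simp [hm, hx]
    rw [hrest]
    simp
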